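-- pv_equiv track=rewrite | github.com/fugrusha/education | PyNEng/Task 9.1.py | generate_access_config
-- ===== SOURCE A (Python) =====
-- def generate_access_config(access):
--     '''
--     access - словарь access-портов,
--     для которых необходимо сгенерировать конфигурацию, вида:
--         { 'FastEthernet0/12':10,
--           'FastEthernet0/14':11,
--           'FastEthernet0/16':17}
--
--     Возвращает список всех портов в режиме access
--     с конфигурацией на основе шаблона
--     '''
--     access_template = ['switchport mode access',
--                        'switchport access vlan',
--                        'switchport nonegotiate',
--                        'spanning-tree portfast',
--                        'spanning-tree bpduguard enable']
--     PORTS = []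
--     for intf, vlan in access.items():
--       PORTS.append('interface {}'.format(intf))
--       for command in access_template:
--         if command.endswith('access vlan'):
--           PORTS.append(command + ' {}'.format(vlan))
--         else:
--           PORTS.append(command)
--     return PORTS
-- ===== SOURCE B (Python) =====
-- def generate_access_config(access):
--     return [line
--             for intf, vlan in access.items()
--             for line in ('interface {}'.format(intf),
--                          'switchport mode access',
--                          'switchport access vlan {}'.format(vlan),
--                          'switchport nonegotiate',
--                          'spanning-tree portfast',
--                          'spanning-tree bpduguard enable')]
-- ===== Notes on version B (the rewrite author's own statement) =====
-- stated objective: simpler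
-- what changed: Replaces the accumulator loop with an inner template scan and endswith test by a single flat comprehension emitting each interface's six-line block directly, with the vlan interpolated at its fixed position.
import Mathlib
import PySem

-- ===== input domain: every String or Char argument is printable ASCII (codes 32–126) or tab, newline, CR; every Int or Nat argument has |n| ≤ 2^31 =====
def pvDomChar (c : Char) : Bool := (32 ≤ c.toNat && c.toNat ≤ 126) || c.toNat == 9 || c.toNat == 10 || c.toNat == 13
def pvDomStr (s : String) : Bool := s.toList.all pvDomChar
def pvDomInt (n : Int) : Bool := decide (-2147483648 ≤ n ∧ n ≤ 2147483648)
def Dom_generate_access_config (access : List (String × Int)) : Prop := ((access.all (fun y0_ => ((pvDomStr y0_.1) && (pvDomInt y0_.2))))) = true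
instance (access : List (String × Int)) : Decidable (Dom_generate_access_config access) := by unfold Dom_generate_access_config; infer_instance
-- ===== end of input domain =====

-- B replaces A's inner template loop with an endswith test by a flat comprehension
-- emitting each interface's six-line block directly (objective: simpler).

-- ===== PORT A =====
-- A's constant template list
def access_template : List String :=
  ["switchport mode access",
   "switchport access vlan",
   "switchport nonegotiate",
   "spanning-tree portfast",
   "spanning-tree bpduguard enable"]

def generate_access_config (access : List (String × Int)) : List String :=
  access.foldl (fun PORTS iv =>
    access_template.foldl (fun P command =>
      if PySem.Str.endswith command "access vlan" then
        P ++ [command ++ " " ++ PySem.Int.toStr iv.2]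
      else
        P ++ [command])
      (PORTS ++ ["interface " ++ iv.1]))
    []

-- ===== PORT B =====
def generate_access_config_alt (access : List (String × Int)) : List String :=
  access.flatMap (fun iv =>
    ["interface " ++ iv.1,
     "switchport mode access",
     "switchport access vlan " ++ PySem.Int.toStr iv.2,
     "switchport nonegotiate",
     "spanning-tree portfast",
     "spanning-tree bpduguard enable"])

-- ===== PRECONDITION & SPEC =====
def Spec_generate_access_config (access : List (String × Int)) (out : List String) : Prop := out = generate_access_config_alt access
instance (access : List (String × Int)) (out : List String) : Decidable (Spec_generate_access_config access out) := by unfold Spec_generate_access_config; infer_instance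

-- ===== CLAIM (what is proved, stated in full; the proofs are below) =====
def Claim_equal_generate_access_config : Prop := ∀ (access : List (String × Int)), Dom_generate_access_config access → Spec_generate_access_config access (generate_access_config access)

-- ===== LEMMAS AND PROOFS =====

-- A's per-interface inner loop emits exactly B's six-line block
theorem generate_access_config_block (P : List String) (iv : String × Int) :
    access_template.foldl (fun P command =>
      if PySem.Str.endswith command "access vlan" then
        P ++ [command ++ " " ++ PySem.Int.toStr iv.2]
      else
        P ++ [command])
      (P ++ ["interface " ++ iv.1]) =
    P ++ ["interface " ++ iv.1,
          "switchport mode access",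
          "switchport access vlan " ++ PySem.Int.toStr iv.2,
          "switchport nonegotiate",
          "spanning-tree portfast",
          "spanning-tree bpduguard enable"] := by
  have h1 : PySem.Chars.endswith "switchport mode access".toList "access vlan".toList = false := by decide
  have h2 : PySem.Chars.endswith "switchport access vlan".toList "access vlan".toList = true := by decide
  have h3 : PySem.Chars.endswith "switchport nonegotiate".toList "access vlan".toList = false := by decide
  have h4 : PySem.Chars.endswith "spanning-tree portfast".toList "access vlan".toList = false := by decide
  have h5 : ("switchport access vlan" ++ " " : String) = "switchport access vlan " := by rfl
  have h6 : PySem.Chars.endswith "spanning-tree bpduguard enable".toList "access vlan".toList = false := by decide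
  simp only [access_template, List.foldl, PySem.Str.endswith_eq, h1, h2, h3, h4, h6,
    if_true, if_false, Bool.false_eq_true]
  simp [h5]

theorem generate_access_config_go (l : List (String × Int)) (acc : List String) :
    l.foldl (fun PORTS iv =>
      access_template.foldl (fun P command =>
        if PySem.Str.endswith command "access vlan" then
          P ++ [command ++ " " ++ PySem.Int.toStr iv.2]
        else
          P ++ [command])
        (PORTS ++ ["interface " ++ iv.1]))
      acc = acc ++ generate_access_config_alt l := by
  induction l generalizing acc with
  | nil => simp [generate_access_config_alt]
  | cons iv tl ih =>
      rw [List.foldl_cons, generate_access_config_block, ih]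
      simp [generate_access_config_alt]

-- ===== VERDICT (by name: the statement is the Claim_ definition above) =====
theorem generate_access_config_spec : Claim_equal_generate_access_config := by
  intro access _
  show generate_access_config access = generate_access_config_alt access
  rw [generate_access_config, generate_access_config_go]
  simp
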